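-- pv_equiv track=rewrite | github.com/Lirokin/big_py_proj | src/masks.py | get_mask_account
-- ===== SOURCE A (Python) =====
-- from typing import Optional
--
-- def get_mask_account(account_number: Optional[str] = None) -> Optional[str]:
--     """Функция принимает на вход номер счета в виде числа
--     и возвращает маску номера по правилу **XXXX"""
--     hidden_number = ""
--     hide_number = [0, 1]
--     for i, char in enumerate(account_number[-6:]):
--         if i in hide_number:
--             hidden_number += "*"
--         else:
--             hidden_number += char
--     return hidden_number
-- ===== SOURCE B (Python) =====
-- from typing import Optional
--
-- def get_mask_account(account_number: Optional[str] = None) -> Optional[str]: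
--     s = account_number[-6:]
--     return "*" * min(2, len(s)) + s[2:]
-- ===== Notes on version B (the rewrite author's own statement) =====
-- stated objective: simpler
-- what changed: Replaces the per-character enumerate loop with index-membership test by a closed-form expression: an asterisk prefix of length min(2, len(tail)) concatenated with tail[2:].
import Mathlib
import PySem

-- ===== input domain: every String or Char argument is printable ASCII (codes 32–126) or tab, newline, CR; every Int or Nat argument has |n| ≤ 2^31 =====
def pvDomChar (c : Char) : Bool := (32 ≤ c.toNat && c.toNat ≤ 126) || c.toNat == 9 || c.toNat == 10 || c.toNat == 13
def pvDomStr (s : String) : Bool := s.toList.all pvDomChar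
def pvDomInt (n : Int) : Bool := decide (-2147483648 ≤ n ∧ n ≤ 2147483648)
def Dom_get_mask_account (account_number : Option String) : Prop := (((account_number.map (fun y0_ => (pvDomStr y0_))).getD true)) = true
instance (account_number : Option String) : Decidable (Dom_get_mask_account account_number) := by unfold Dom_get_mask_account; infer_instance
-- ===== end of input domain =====

-- B replaces A's per-character enumerate loop (index membership in [0,1]) by a closed-form
-- slice expression '*' * min(2, len(tail)) + tail[2:]; objective: simpler.


-- ===== PORT A =====
-- account_number[-6:] on None raises TypeError → the 'none' case returns none (excluded by Pre_).
def get_mask_account (account_number : Option String) : Option String :=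
  match account_number with
  | none => none
  | some s =>
    let hide_number : List Int := [0, 1]
    let hidden_number : List Char :=
      (PySem.List.enumerate (PySem.List.slice s.toList (some (-6)) none) 0).foldl
        (fun acc p => if hide_number.contains p.1 then acc ++ ['*'] else acc ++ [p.2]) []
    some (String.mk hidden_number)

-- ===== PORT B =====
def get_mask_account_alt (account_number : Option String) : Option String :=
  match account_number with
  | none => none
  | some str =>
    let t := PySem.List.slice str.toList (some (-6)) none
    some (String.mk (List.replicate (min 2 t.length) '*' ++ t.drop 2))

-- ===== PRECONDITION & SPEC =====
-- A subscripts account_number, so it raises TypeError on None: Pre_ excludes exactly that input.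
def Pre_get_mask_account (account_number : Option String) : Prop := account_number.isSome = true
instance (account_number : Option String) : Decidable (Pre_get_mask_account account_number) := by unfold Pre_get_mask_account; infer_instance
def pvWitness_get_mask_account : Option String := some "1234567890"
def Spec_get_mask_account (account_number : Option String) (out : Option String) : Prop := out = get_mask_account_alt account_number
instance (account_number : Option String) (out : Option String) : Decidable (Spec_get_mask_account account_number out) := by unfold Spec_get_mask_account; infer_instance

-- ===== CLAIM (what is proved, stated in full; the proofs are below) =====
def Claim_equal_get_mask_account : Prop := ∀ (account_number : Option String), Dom_get_mask_account account_number → Pre_get_mask_account account_number → Spec_get_mask_account account_number (get_mask_account account_number)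

-- ===== LEMMAS AND PROOFS =====

-- The tail of A's loop (indices >= 2) just copies the characters.
lemma fold_copy (l : List Char) (n : Int) (hn : 2 ≤ n) (acc : List Char) :
    (PySem.List.enumerate l n).foldl
      (fun acc p => if [(0:Int), 1].contains p.1 then acc ++ ['*'] else acc ++ [p.2]) acc
    = acc ++ l := by
  induction l generalizing n acc with
  | nil => simp [PySem.List.enumerate_nil]
  | cons x xs ih =>
    have h0 : ([(0:Int), 1].contains n) = false := by
      simp only [List.contains_cons, List.contains_nil, Bool.or_false, Bool.or_eq_false_iff,
        beq_eq_false_iff_ne]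
      omega
    rw [PySem.List.enumerate_cons]
    simp only [List.foldl_cons, h0, Bool.false_eq_true, if_false]
    rw [ih (n + 1) (by omega)]
    simp

-- A's whole loop equals B's closed form, for any char list.
lemma fold_eq_closed (l : List Char) :
    (PySem.List.enumerate l 0).foldl
      (fun acc p => if [(0:Int), 1].contains p.1 then acc ++ ['*'] else acc ++ [p.2]) []
    = List.replicate (min 2 l.length) '*' ++ l.drop 2 := by
  match l with
  | [] => simp [PySem.List.enumerate_nil]
  | [a] =>
    rw [PySem.List.enumerate_cons, PySem.List.enumerate_nil]
    simp
  | a :: b :: rest =>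
    rw [PySem.List.enumerate_cons, PySem.List.enumerate_cons]
    simp only [List.foldl_cons, show ([(0:Int), 1].contains 0) = true from by decide,
      show ([(0:Int), 1].contains (0 + 1)) = true from by decide, if_true,
      show (0:Int) + 1 + 1 = 2 from by norm_num]
    rw [fold_copy rest 2 (by omega)]
    simp [List.replicate]

-- ===== VERDICT (by name: the statement is the Claim_ definition above) =====
theorem get_mask_account_spec : Claim_equal_get_mask_account := by
  intro an _ hpre
  unfold Spec_get_mask_account
  match an with
  | none => simp [Pre_get_mask_account] at hpre
  | some s =>
    simp only [get_mask_account, get_mask_account_alt]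
    rw [fold_eq_closed]
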